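-- pv_equiv track=rewrite | github.com/wilmurillo-ai/Design-Assistant | .skills/openclaw-skills/skills/biociao/literature-daily-report/scripts/literature_collector.py | select_featured_articles
-- ===== SOURCE A (Python) =====
-- def select_featured_articles(articles, max_featured=8):
--     """选择重点推荐文章（基于期刊影响力、相关性等）"""
--     # 优先级评分
--     def score_article(article):
--         score = 0
--         journal = article.get("journal", "").lower()
--         title = article.get("title", "").lower()
--         abstract = article.get("abstract", "").lower()
--
--         # 高影响力期刊加分
--         high_impact = ["nature", "science", "cell", "genome biology", "genome research",
--                       "nature biotechnology", "nature methods", "molecular cell"]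
--         if any(hij in journal for hij in high_impact):
--             score += 10
--
--         # 方法开发加分
--         method_keywords = ["method", "tool", "pipeline", "framework", "algorithm", "software"]
--         if any(mk in title or mk in abstract for mk in method_keywords):
--             score += 5
--
--         # 单细胞/AI 加分
--         hot_topics = ["single-cell", "deep learning", "transformer", "foundation model"]
--         if any(ht in title or ht in abstract for ht in hot_topics):
--             score += 3
--
--         return score
--
--     # 排序并选择
--     scored = sorted(articles, key=score_article, reverse=True)
--     return scored[:max_featured]
-- ===== SOURCE B (Python) =====
-- def select_featured_articles(articles, max_featured=8):
--     """Bucket (counting) selection over the small discrete score range instead of sorting;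
--     scoring is data-driven over a rule table instead of an if-chain."""
--     def score_article(article):
--         journal = article.get("journal", "").lower()
--         title = article.get("title", "").lower()
--         abstract = article.get("abstract", "").lower()
--         rules = [
--             (10, ["nature", "science", "cell", "genome biology", "genome research",
--                   "nature biotechnology", "nature methods", "molecular cell"], [journal]),
--             (5, ["method", "tool", "pipeline", "framework", "algorithm", "software"],
--                 [title, abstract]),
--             (3, ["single-cell", "deep learning", "transformer", "foundation model"],
--                 [title, abstract]),
--         ]
--         return sum(pts for pts, kws, fields in rules
--                    if any(k in f for k in kws for f in fields))
--
--     scores = (18, 15, 13, 10, 8, 5, 3, 0)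
--     buckets = {s: [] for s in scores}
--     for article in articles:
--         buckets[score_article(article)].append(article)
--     out = []
--     for s in scores:
--         out.extend(buckets[s])
--     return out[:max_featured]
-- ===== Notes on version B (the rewrite author's own statement) =====
-- stated objective: alternative
-- what changed: Replaces the stable reverse sort with a one-pass counting/bucket selection over the 8 possible scores (buckets filled in input order, concatenated high-to-low), and replaces the if-chain scoring with a data-driven rule table.
import Mathlib
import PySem

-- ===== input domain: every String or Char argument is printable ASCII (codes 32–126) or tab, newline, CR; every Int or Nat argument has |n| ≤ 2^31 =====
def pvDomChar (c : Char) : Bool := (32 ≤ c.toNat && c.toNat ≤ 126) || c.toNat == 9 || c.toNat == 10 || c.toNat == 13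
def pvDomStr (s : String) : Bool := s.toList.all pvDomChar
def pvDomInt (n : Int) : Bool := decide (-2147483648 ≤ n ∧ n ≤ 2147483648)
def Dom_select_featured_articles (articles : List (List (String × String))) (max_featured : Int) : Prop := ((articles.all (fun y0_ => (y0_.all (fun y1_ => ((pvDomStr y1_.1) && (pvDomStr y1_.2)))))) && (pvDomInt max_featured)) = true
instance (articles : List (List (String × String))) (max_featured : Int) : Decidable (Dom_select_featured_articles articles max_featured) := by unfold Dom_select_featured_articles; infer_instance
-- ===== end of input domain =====

-- B replaces the stable reverse sort by a one-pass bucket selection over the 8 possible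
-- scores (and a rule-table scoring); same return value, alternative algorithm.

-- ===== PORT A =====
-- inner helper score_article of A
def score_article (article : List (String × String)) : Int :=
  let journal := PySem.Str.lower (PySem.Dict.getD (PySem.Dict.mk article) "journal" "")
  let title := PySem.Str.lower (PySem.Dict.getD (PySem.Dict.mk article) "title" "")
  let abstract := PySem.Str.lower (PySem.Dict.getD (PySem.Dict.mk article) "abstract" "")
  let score : Int := 0
  let high_impact : List String := ["nature", "science", "cell", "genome biology", "genome research",
                    "nature biotechnology", "nature methods", "molecular cell"]
  let score := if high_impact.any (fun hij => PySem.Str.isIn hij journal) then score + 10 else score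
  let method_keywords : List String := ["method", "tool", "pipeline", "framework", "algorithm", "software"]
  let score := if method_keywords.any (fun mk => PySem.Str.isIn mk title || PySem.Str.isIn mk abstract) then score + 5 else score
  let hot_topics : List String := ["single-cell", "deep learning", "transformer", "foundation model"]
  let score := if hot_topics.any (fun ht => PySem.Str.isIn ht title || PySem.Str.isIn ht abstract) then score + 3 else score
  score

def select_featured_articles (articles : List (List (String × String))) (max_featured : Int) : List (List (String × String)) :=
  let scored := PySem.List.sorted articles score_article true
  PySem.List.slice scored none (some max_featured)

-- ===== PORT B =====
-- inner helper score_article of B (rule-table form)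
def score_article_alt (article : List (String × String)) : Int :=
  let journal := PySem.Str.lower (PySem.Dict.getD (PySem.Dict.mk article) "journal" "")
  let title := PySem.Str.lower (PySem.Dict.getD (PySem.Dict.mk article) "title" "")
  let abstract := PySem.Str.lower (PySem.Dict.getD (PySem.Dict.mk article) "abstract" "")
  let rules : List (Int × List String × List String) :=
    [(10, ["nature", "science", "cell", "genome biology", "genome research",
           "nature biotechnology", "nature methods", "molecular cell"], [journal]),
     (5, ["method", "tool", "pipeline", "framework", "algorithm", "software"], [title, abstract]),
     (3, ["single-cell", "deep learning", "transformer", "foundation model"], [title, abstract])]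
  ((rules.filter (fun r => r.2.1.any (fun k => r.2.2.any (fun f => PySem.Str.isIn k f)))).map (fun r => r.1)).sum

-- the 8 possible scores, high to low
def pvScoresList : List Int := [18, 15, 13, 10, 8, 5, 3, 0]

def select_featured_articles_alt (articles : List (List (String × String))) (max_featured : Int) : List (List (String × String)) :=
  let buckets : PySem.Dict Int (List (List (String × String))) :=
    pvScoresList.foldl (fun d s => d.insert s []) (PySem.Dict.mk [])                                   -- {s: [] for s in scores}
  let buckets := articles.foldl
    (fun d a => PySem.Dict.modify d (score_article_alt a) [] (fun l => l ++ [a])) buckets  -- buckets[score].append(article)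
  let out := pvScoresList.foldl (fun acc s => acc ++ PySem.Dict.getD buckets s []) []  -- out.extend(buckets[s])
  PySem.List.slice out none (some max_featured)

-- ===== PRECONDITION & SPEC =====
def Spec_select_featured_articles (articles : List (List (String × String))) (max_featured : Int) (out : List (List (String × String))) : Prop := out = select_featured_articles_alt articles max_featured
instance (articles : List (List (String × String))) (max_featured : Int) (out : List (List (String × String))) : Decidable (Spec_select_featured_articles articles max_featured out) := by unfold Spec_select_featured_articles; infer_instance

-- ===== CLAIM (what is proved, stated in full; the proofs are below) =====
def Claim_equal_select_featured_articles : Prop := ∀ (articles : List (List (String × String))) (max_featured : Int), Dom_select_featured_articles articles max_featured → Spec_select_featured_articles articles max_featured (select_featured_articles articles max_featured)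

-- ===== LEMMAS AND PROOFS =====

-- the two scorings agree
theorem score_alt_eq (a : List (String × String)) : score_article_alt a = score_article a := by
  unfold score_article_alt score_article
  simp only [List.filter_cons, List.filter_nil, List.any_cons, List.any_nil, Bool.or_false]
  split_ifs <;> simp_all

-- every score is one of the 8 values
theorem score_mem (a : List (String × String)) : score_article a ∈ pvScoresList := by
  unfold score_article pvScoresList
  dsimp only
  split_ifs <;> decide

theorem insertBy_append_not {α : Type} (pred : α → α → Bool) (x : α) (l1 l2 : List α)
    (h : ∀ b ∈ l1, pred x b = false) :
    PySem.List.insertBy pred x (l1 ++ l2) = l1 ++ PySem.List.insertBy pred x l2 := by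
  induction l1 with
  | nil => simp
  | cons b t ih =>
      have hb : pred x b = false := h b (List.mem_cons_self)
      have ht := ih (fun c hc => h c (List.mem_cons_of_mem _ hc))
      cases l2 with
      | nil => simp [PySem.List.insertBy, hb] at ht ⊢; exact ht
      | cons c t2 => simp [PySem.List.insertBy, hb] at ht ⊢; exact ht

theorem insertBy_all {α : Type} (pred : α → α → Bool) (x : α) (l : List α)
    (h : ∀ b ∈ l, pred x b = true) :
    PySem.List.insertBy pred x l = x :: l := by
  cases l with
  | nil => rfl
  | cons b t => simp [PySem.List.insertBy, h b List.mem_cons_self]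

theorem insertBy_buckets {α : Type} (key : α → Int) (x : α) (scores : List Int) (ys : List α)
    (hdesc : scores.Pairwise (· > ·)) (hx : key x ∈ scores) :
    PySem.List.insertBy (fun a b => decide (key b < key a)) x
      (scores.flatMap (fun s => ys.filter (fun a => key a == s)))
    = scores.flatMap (fun s => (ys ++ [x]).filter (fun a => key a == s)) := by
  induction scores with
  | nil => cases hx
  | cons s rest ih =>
      have hrest : rest.Pairwise (· > ·) := hdesc.of_cons
      have hs : ∀ t ∈ rest, t < s := fun t htm => List.rel_of_pairwise_cons hdesc htm
      simp only [List.flatMap_cons]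
      by_cases hxs : key x = s
      · -- x belongs to the head bucket: it is appended right after it
        have hskip : ∀ b ∈ ys.filter (fun a => key a == s), (fun a b => decide (key b < key a)) x b = false := by
          intro b hb
          have hbs := eq_of_beq (List.mem_filter.mp hb).2
          simp [hbs, hxs]
        have hall : ∀ b ∈ rest.flatMap (fun t => ys.filter (fun a => key a == t)),
            (fun a b => decide (key b < key a)) x b = true := by
          intro b hb
          obtain ⟨t, htm, hbf⟩ := List.mem_flatMap.mp hb
          have hbt := eq_of_beq (List.mem_filter.mp hbf).2
          simp only [hbt, hxs, decide_eq_true_eq]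
          exact hs t htm
        rw [insertBy_append_not _ _ _ _ hskip, insertBy_all _ _ _ hall]
        have htail : rest.flatMap (fun t => (ys ++ [x]).filter (fun a => key a == t))
            = rest.flatMap (fun t => ys.filter (fun a => key a == t)) := by
          apply List.flatMap_congr
          intro t htm
          have hne : (key x == t) = false := by
            simp only [beq_eq_false_iff_ne, ne_eq, hxs]
            exact (hs t htm).ne'
          simp [List.filter_append, hne]
        rw [htail, List.filter_append]
        simp [hxs]
      · -- x belongs to a later bucket: skip the head bucket, recurse
        have hxr : key x ∈ rest := by
          rcases List.mem_cons.mp hx with h | h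
          · exact absurd h hxs
          · exact h
        have hlt : key x < s := hs _ hxr
        have hskip : ∀ b ∈ ys.filter (fun a => key a == s), (fun a b => decide (key b < key a)) x b = false := by
          intro b hb
          have hbs := eq_of_beq (List.mem_filter.mp hb).2
          simp only [hbs, decide_eq_false_iff_not, not_lt]
          exact le_of_lt hlt
        rw [insertBy_append_not _ _ _ _ hskip, ih hrest hxr]
        have hne : (key x == s) = false := by
          simp only [beq_eq_false_iff_ne, ne_eq]
          exact hxs
        rw [List.filter_append]
        simp [hne]

theorem sorted_rev_buckets {α : Type} (key : α → Int) (scores : List Int)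
    (hdesc : scores.Pairwise (· > ·)) (xs : List α) (hmem : ∀ a ∈ xs, key a ∈ scores) :
    PySem.List.sorted xs key true = scores.flatMap (fun s => xs.filter (fun a => key a == s)) := by
  induction xs using List.reverseRecOn with
  | nil => simp [PySem.List.sorted]
  | append_singleton ys x ih =>
      rw [PySem.List.sorted_rev_eq_foldl_insertBy, List.foldl_append]
      simp only [List.foldl_cons, List.foldl_nil]
      rw [← PySem.List.sorted_rev_eq_foldl_insertBy]
      rw [ih (fun a ha => hmem a (List.mem_append_left _ ha))]
      exact insertBy_buckets key x scores ys hdesc (hmem x (by simp))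

theorem buckets_getD (arts : List (List (String × String))) :
    ∀ (d : PySem.Dict Int (List (List (String × String)))) (s : Int),
    (arts.foldl (fun d a => PySem.Dict.modify d (score_article_alt a) [] (fun l => l ++ [a])) d).getD s []
    = d.getD s [] ++ arts.filter (fun a => score_article_alt a == s) := by
  induction arts with
  | nil => simp
  | cons a rest ih =>
      intro d s
      simp only [List.foldl_cons, List.filter_cons]
      rw [ih]
      unfold PySem.Dict.modify
      rw [PySem.Dict.getD_insert]
      by_cases hs : s = score_article_alt a
      · simp [hs]
      · have : ¬ (score_article_alt a == s) = true := by simp; omega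
        simp [hs, this]

theorem buckets0_getD (s : Int) :
    (pvScoresList.foldl (fun d s => d.insert s []) (PySem.Dict.mk [] : PySem.Dict Int (List (List (String × String))))).getD s [] = [] := by
  unfold pvScoresList
  simp only [List.foldl_cons, List.foldl_nil]
  simp only [PySem.Dict.getD_insert]
  split_ifs <;> rfl

-- ===== VERDICT (by name: the statement is the Claim_ definition above) =====
theorem select_featured_articles_spec : Claim_equal_select_featured_articles := by
  intro articles max_featured _
  unfold Spec_select_featured_articles select_featured_articles select_featured_articles_alt
  dsimp only
  rw [PySem.List.foldl_append_eq_flatMap]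
  simp only [List.nil_append]
  congr 1
  rw [sorted_rev_buckets score_article pvScoresList (by unfold pvScoresList; decide) articles
        (fun a _ => score_mem a)]
  apply List.flatMap_congr
  intro s _
  rw [buckets_getD, buckets0_getD, List.nil_append]
  apply List.filter_congr
  intro a _
  rw [score_alt_eq]
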